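-- pv_equiv track=rewrite | github.com/ishon19/vigilant-couscous | 162.find-peak-element.py | findValleyElement
-- ===== SOURCE A (Python) =====
-- from typing import List
--
-- def findValleyElement(nums: List[int]) -> int:
--     l, r = 0, len(nums) - 1
--
--     while l < r:
--         mid = (l + r) // 2
--
--         if nums[mid] > nums[mid+1]:
--             l = mid + 1
--         else:
--             r = mid
--
--     return l
-- ===== SOURCE B (Python) =====
-- from typing import List
--
-- def findValleyElement(nums: List[int]) -> int:
--     # Divide and conquer on list slices: returns offset within the slice.
--     def search(sub: List[int]) -> int:
--         if len(sub) <= 1: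
--             return 0
--         m = (len(sub) - 1) // 2
--         if sub[m] > sub[m + 1]:
--             return m + 1 + search(sub[m + 1:])
--         return search(sub[:m + 1])
--     return search(nums)
-- ===== Notes on version B (the rewrite author's own statement) =====
-- stated objective: alternative
-- what changed: Replaces the iterative while-loop over mutable integer bounds l/r by a divide-and-conquer recursion on list slices: the helper takes the current sublist, picks m=(len-1)//2, recurses on sub[m+1:] or sub[:m+1], and returns a relative offset that the caller shifts by m+1.
import Mathlib
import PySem

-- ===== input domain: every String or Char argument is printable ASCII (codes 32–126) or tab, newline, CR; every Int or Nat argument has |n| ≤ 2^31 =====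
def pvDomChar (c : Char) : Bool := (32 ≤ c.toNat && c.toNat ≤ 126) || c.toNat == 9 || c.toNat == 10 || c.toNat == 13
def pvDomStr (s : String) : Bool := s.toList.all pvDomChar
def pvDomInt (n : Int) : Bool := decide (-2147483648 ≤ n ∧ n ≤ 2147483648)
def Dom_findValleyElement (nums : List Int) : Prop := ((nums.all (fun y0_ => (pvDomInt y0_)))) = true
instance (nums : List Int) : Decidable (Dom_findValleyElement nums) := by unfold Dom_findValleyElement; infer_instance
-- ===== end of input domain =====

-- B replaces A's iterative while-loop over int bounds by divide-and-conquer on list slices (offset arithmetic); objective: alternative decomposition.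


-- ===== PORT A =====
-- while l < r: …  (nums[mid]/nums[mid+1] are provably in range whenever the loop body runs, so .getD 0 is never taken)
def pvALoop (nums : List Int) (l r : Int) : Int :=
  if h : l < r then
    let mid := PySem.Int.floordiv (l + r) 2
    if (PySem.List.pyGet? nums mid).getD 0 > (PySem.List.pyGet? nums (mid + 1)).getD 0 then
      pvALoop nums (mid + 1) r
    else
      pvALoop nums l mid
  else l
termination_by (r - l).toNat
decreasing_by
  all_goals have h1 := PySem.Int.floordiv_two_mid_bounds (show l ≤ r by omega)
  all_goals have h2 : PySem.Int.floordiv (l + r) 2 < r :=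
    (PySem.Int.floordiv_lt_iff_lt_mul (show (0:Int) < 2 by omega)).mpr (by omega)
  all_goals simp only [mid] at *
  all_goals omega

def findValleyElement (nums : List Int) : Int :=
  pvALoop nums 0 ((nums.length : Int) - 1)

-- ===== PORT B =====
-- search(sub): recursion on the slice itself; m and m+1 are always in range when taken
-- (len ≥ 2), so sub[m] → sub.getD m 0 and the slices sub[m+1:], sub[:m+1] → drop/take are exact.
def pvBSearch (sub : List Int) : Int :=
  if sub.length ≤ 1 then 0
  else
    let m : Nat := (sub.length - 1) / 2
    if sub.getD m 0 > sub.getD (m + 1) 0 then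
      ((m : Int) + 1) + pvBSearch (sub.drop (m + 1))
    else
      pvBSearch (sub.take (m + 1))
termination_by sub.length
decreasing_by
  · simp; omega
  · have : sub.length ≥ 2 := by omega
    simp; omega

def findValleyElement_alt (nums : List Int) : Int :=
  pvBSearch nums

-- ===== PRECONDITION & SPEC =====
def Spec_findValleyElement (nums : List Int) (out : Int) : Prop := out = findValleyElement_alt nums
instance (nums : List Int) (out : Int) : Decidable (Spec_findValleyElement nums out) := by unfold Spec_findValleyElement; infer_instance

-- ===== CLAIM (what is proved, stated in full; the proofs are below) =====
def Claim_equal_findValleyElement : Prop := ∀ (nums : List Int), Dom_findValleyElement nums → Spec_findValleyElement nums (findValleyElement nums)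

-- ===== LEMMAS AND PROOFS =====
theorem pvALoop_eq (nums : List Int) (l r : Nat) (hr : r < nums.length) (hlr : l ≤ r) :
    pvALoop nums l r = (l : Int) + pvBSearch ((nums.drop l).take (r - l + 1)) := by
  induction hn : r - l using Nat.strong_induction_on generalizing l r with
  | _ n ih =>
  subst hn
  by_cases hlt : l < r
  · rw [pvALoop, dif_pos (by exact_mod_cast hlt)]
    have hmid : PySem.Int.floordiv ((l : Int) + r) 2 = (((l + r) / 2 : Nat) : Int) := by
      exact_mod_cast PySem.Int.floordiv_natCast (l + r) 2
    set m : Nat := (l + r) / 2 with hm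
    have hmlb : l ≤ m := by omega
    have hmub : m < r := by omega
    set sub : List Int := (nums.drop l).take (r - l + 1) with hsub
    have hslen : sub.length = r - l + 1 := by
      simp [hsub]; omega
    have hget : ∀ k, k ≤ r - l → sub.getD k 0 = nums.getD (l + k) 0 := by
      intro k hk
      simp [hsub, List.getD, List.getElem?_drop, Nat.lt_succ_of_le hk]
    have hgetA : ∀ j : Nat, j < nums.length →
        ((PySem.List.pyGet? nums (j : Int)).getD 0) = nums.getD j 0 := by
      intro j hj
      simp [PySem.List.pyGet?_natCast, List.getD]
    set mB : Nat := (r - l) / 2 with hmB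
    have hmeq : m = l + mB := by omega
    have hmB' : (sub.length - 1) / 2 = mB := by rw [hslen]; omega
    have hcond : sub.getD mB 0 > sub.getD (mB + 1) 0 ↔
        (PySem.List.pyGet? nums (PySem.Int.floordiv ((l : Int) + r) 2)).getD 0 >
        (PySem.List.pyGet? nums (PySem.Int.floordiv ((l : Int) + r) 2 + 1)).getD 0 := by
      rw [hmid]
      rw [show (((l + r) / 2 : Nat) : Int) + 1 = ((m + 1 : Nat) : Int) by push_cast; omega]
      rw [hgetA m (by omega), hgetA (m + 1) (by omega)]
      rw [hget mB (by omega), hget (mB + 1) (by omega)]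
      rw [show l + mB = m by omega, show l + (mB + 1) = m + 1 by omega]
    by_cases hc : sub.getD mB 0 > sub.getD (mB + 1) 0
    · rw [if_pos (hcond.mp hc)]
      rw [pvBSearch.eq_1 sub, if_neg (show ¬ sub.length ≤ 1 by omega)]
      simp only [hmB']
      rw [if_pos hc, hmid]
      rw [show (((l + r) / 2 : Nat) : Int) + 1 = ((m + 1 : Nat) : Int) by push_cast; omega]
      rw [ih (r - (m + 1)) (by omega) (m + 1) r hr (by omega) rfl]
      have hdrop : sub.drop (mB + 1) = (nums.drop (m + 1)).take (r - (m + 1) + 1) := by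
        rw [hsub, List.drop_take, List.drop_drop]
        congr 1
        · omega
        · congr 1; omega
      rw [hdrop]
      push_cast
      linarith [show (m : Int) = (l : Int) + mB by exact_mod_cast hmeq]
    · rw [if_neg (fun h => hc (hcond.mpr h))]
      rw [pvBSearch.eq_1 sub, if_neg (show ¬ sub.length ≤ 1 by omega)]
      simp only [hmB']
      rw [if_neg hc, hmid]
      rw [show (((l + r) / 2 : Nat) : Int) = ((m : Nat) : Int) by rfl]
      rw [ih (m - l) (by omega) l m (by omega) (by omega) rfl]
      have htake : sub.take (mB + 1) = (nums.drop l).take (m - l + 1) := by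
        rw [hsub, List.take_take]
        congr 1
        omega
      rw [htake]
  · have hlr' : l = r := by omega
    subst hlr'
    rw [pvALoop, dif_neg (by omega)]
    rw [pvBSearch.eq_1]
    rw [if_pos (by simp)]
    omega

theorem findValleyElement_spec : Claim_equal_findValleyElement := by
  intro nums _
  unfold Spec_findValleyElement findValleyElement findValleyElement_alt
  rcases Nat.eq_zero_or_pos nums.length with h0 | hpos
  · rw [List.eq_nil_of_length_eq_zero h0]
    rw [pvALoop, pvBSearch]; simp
  · have h := pvALoop_eq nums 0 (nums.length - 1) (by omega) (by omega)
    simp [show nums.length - 1 + 1 = nums.length by omega] at h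
    rw [show ((nums.length : Int) - 1) = ((nums.length - 1 : Nat) : Int) by omega, h]
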